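-- pv_equiv track=rewrite | github.com/sohilgoswami/jkss | backend/webscraper.py | collect_data_between_152_and_167
-- ===== SOURCE A (Python) =====
-- def collect_data_between_152_and_167(pdf_text):
--     data_collected9 = False
--     collected_data9 = []
--     for line in pdf_text.split("\n"):
--         if "MATH-152" in line:
--             data_collected9 = True
--         elif "MATH-167" in line:
--             data_collected9 = False
--             break
--
--         if data_collected9:
--             collected_data9.append(line)
--
--     return collected_data9
-- ===== SOURCE B (Python) =====
-- def collect_data_between_152_and_167(pdf_text):
--     lines = pdf_text.split("\n")
--     cut = next((i for i, l in enumerate(lines)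
--                 if "MATH-167" in l and "MATH-152" not in l), len(lines))
--     segment = lines[:cut]
--     start = next((i for i, l in enumerate(segment) if "MATH-152" in l),
--                  len(segment))
--     return segment[start:]
-- ===== Notes on version B (the rewrite author's own statement) =====
-- stated objective: alternative
-- what changed: B finds the two boundary indices (first MATH-167-but-not-MATH-152 line, then first MATH-152 line before it) and returns one slice, instead of A's single pass with a running boolean flag and break.
import Mathlib
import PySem

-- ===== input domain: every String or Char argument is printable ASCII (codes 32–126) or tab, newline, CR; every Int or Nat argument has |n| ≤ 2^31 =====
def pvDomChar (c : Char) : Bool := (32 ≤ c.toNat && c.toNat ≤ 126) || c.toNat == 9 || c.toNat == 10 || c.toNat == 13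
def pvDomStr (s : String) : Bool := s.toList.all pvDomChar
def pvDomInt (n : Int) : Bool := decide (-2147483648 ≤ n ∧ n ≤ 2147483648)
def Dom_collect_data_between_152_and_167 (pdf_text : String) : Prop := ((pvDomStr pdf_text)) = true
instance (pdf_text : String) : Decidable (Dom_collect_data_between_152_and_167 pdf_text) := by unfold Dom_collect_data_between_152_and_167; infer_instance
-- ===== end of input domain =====

-- B computes the two boundary indices and slices once, instead of A's flag-and-break pass (alternative decomposition, same cost).

-- ===== PORT A =====
-- the for-loop with its running flag, accumulator and `break` (break = return the accumulator)
def pvALoop : List String → Bool → List String → List String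
  | [], _, acc => acc
  | l :: rest, flag, acc =>
    if PySem.Str.isIn "MATH-152" l then
      pvALoop rest true (acc ++ [l])
    else if PySem.Str.isIn "MATH-167" l then
      acc
    else if flag then
      pvALoop rest flag (acc ++ [l])
    else
      pvALoop rest flag acc

def collect_data_between_152_and_167 (pdf_text : String) : List String :=
  pvALoop ((PySem.Str.split? pdf_text "\n").getD []) false []

-- ===== PORT B =====
def collect_data_between_152_and_167_alt (pdf_text : String) : List String :=
  let lines := (PySem.Str.split? pdf_text "\n").getD []
  let cut := lines.findIdx (fun l => PySem.Str.isIn "MATH-167" l && !PySem.Str.isIn "MATH-152" l)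
  let segment := lines.take cut
  let start := segment.findIdx (fun l => PySem.Str.isIn "MATH-152" l)
  segment.drop start

-- ===== PRECONDITION & SPEC =====
def Spec_collect_data_between_152_and_167 (pdf_text : String) (out : List String) : Prop := out = collect_data_between_152_and_167_alt pdf_text
instance (pdf_text : String) (out : List String) : Decidable (Spec_collect_data_between_152_and_167 pdf_text out) := by unfold Spec_collect_data_between_152_and_167; infer_instance

-- ===== CLAIM (what is proved, stated in full; the proofs are below) =====
def Claim_equal_collect_data_between_152_and_167 : Prop := ∀ (pdf_text : String), Dom_collect_data_between_152_and_167 pdf_text → Spec_collect_data_between_152_and_167 pdf_text (collect_data_between_152_and_167 pdf_text)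

-- ===== LEMMAS AND PROOFS =====

-- proof-local names for B's two line predicates
def pvBrk (l : String) : Bool := PySem.Str.isIn "MATH-167" l && !PySem.Str.isIn "MATH-152" l
def pv152 (l : String) : Bool := PySem.Str.isIn "MATH-152" l

-- take up to the first index where p holds = takeWhile (¬ p)
lemma take_findIdx_eq_takeWhile (p : String → Bool) (l : List String) :
    l.take (l.findIdx p) = l.takeWhile (fun x => !p x) := by
  induction l with
  | nil => rfl
  | cons a rest ih =>
    cases h : p a with
    | true => rw [List.findIdx_cons, List.takeWhile_cons]; simp only [h]; rfl
    | false =>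
      rw [List.findIdx_cons, List.takeWhile_cons]
      simp only [h, Bool.not_false, cond_false, if_true, List.take_succ_cons, ih]

-- once the flag is true, the loop appends every remaining line up to (excluding) the first break line
lemma pvALoop_true (lines : List String) (acc : List String) :
    pvALoop lines true acc = acc ++ lines.takeWhile (fun l => !pvBrk l) := by
  induction lines generalizing acc with
  | nil => simp [pvALoop]
  | cons l rest ih =>
    rw [pvALoop, List.takeWhile_cons]
    by_cases h152 : PySem.Str.isIn "MATH-152" l = true
    · have hb : pvBrk l = false := by rw [pvBrk, h152]; simp
      rw [if_pos h152, ih]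
      simp only [hb, Bool.not_false, if_true, List.append_assoc, List.singleton_append]
    · rw [if_neg h152]
      simp only [Bool.not_eq_true] at h152
      by_cases h167 : PySem.Str.isIn "MATH-167" l = true
      · have hb : pvBrk l = true := by rw [pvBrk, h152, h167]; rfl
        rw [if_pos h167]
        simp [hb]
      · have hb : pvBrk l = false := by
          rw [pvBrk]; cases hx : PySem.Str.isIn "MATH-167" l
          · rfl
          · exact absurd hx h167
        rw [if_neg h167, if_pos rfl, ih]
        simp only [hb, Bool.not_false, if_true, List.append_assoc, List.singleton_append]

-- with the flag still false, the loop computes B's slice of the remaining lines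
lemma pvALoop_false (lines : List String) (acc : List String) :
    pvALoop lines false acc =
      acc ++ (let seg := lines.takeWhile (fun l => !pvBrk l);
              seg.drop (seg.findIdx pv152)) := by
  induction lines generalizing acc with
  | nil => simp [pvALoop]
  | cons l rest ih =>
    rw [pvALoop, List.takeWhile_cons]
    by_cases h152 : PySem.Str.isIn "MATH-152" l = true
    · have hb : pvBrk l = false := by rw [pvBrk, h152]; simp
      have h1 : pv152 l = true := by rw [pv152, h152]
      rw [if_pos h152, pvALoop_true]
      simp only [hb, Bool.not_false, if_true, List.findIdx_cons, h1, cond_true,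
        List.drop_zero, List.append_assoc, List.singleton_append]
    · rw [if_neg h152]
      simp only [Bool.not_eq_true] at h152
      have h1 : pv152 l = false := by rw [pv152, h152]
      by_cases h167 : PySem.Str.isIn "MATH-167" l = true
      · have hb : pvBrk l = true := by rw [pvBrk, h152, h167]; rfl
        rw [if_pos h167]
        simp [hb]
      · have hb : pvBrk l = false := by
          rw [pvBrk]; cases hx : PySem.Str.isIn "MATH-167" l
          · rfl
          · exact absurd hx h167
        rw [if_neg h167, if_neg (by simp), ih]
        simp only [hb, Bool.not_false, if_true, List.findIdx_cons, h1, cond_false,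
          List.drop_succ_cons]

-- ===== VERDICT (by name: the statement is the Claim_ definition above) =====
theorem collect_data_between_152_and_167_spec : Claim_equal_collect_data_between_152_and_167 := by
  intro pdf_text _
  unfold Spec_collect_data_between_152_and_167 collect_data_between_152_and_167
    collect_data_between_152_and_167_alt
  rw [pvALoop_false, List.nil_append]
  simp only [take_findIdx_eq_takeWhile]
  rfl
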